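-- pv_equiv track=rewrite | github.com/Mortar/mortar_sqlalchemy | mortar_sqlalchemy/mixins/temporal.py | _windowed
-- ===== SOURCE A (Python) =====
-- from itertools import tee
-- from itertools import zip_longest
--
-- def _windowed(iterable):
--     a, b = tee(iterable)
--     next(b, None)
--     is_first = True
--     for (x, y) in zip_longest(a, b):
--         is_last = y is None
--         yield x, is_first, is_last
--         is_first = False
-- ===== SOURCE B (Python) =====
-- def _windowed(iterable):
--     seq = list(iterable)
--     last = len(seq) - 1
--     for i, x in enumerate(seq):
--         yield x, i == 0, i == last
-- ===== Notes on version B (the rewrite author's own statement) =====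
-- stated objective: simpler
-- what changed: Replaces the tee/zip_longest lookahead pairing with a single enumerate over the materialised sequence, computing the flags by index comparison (i == 0, i == last).
import Mathlib
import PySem

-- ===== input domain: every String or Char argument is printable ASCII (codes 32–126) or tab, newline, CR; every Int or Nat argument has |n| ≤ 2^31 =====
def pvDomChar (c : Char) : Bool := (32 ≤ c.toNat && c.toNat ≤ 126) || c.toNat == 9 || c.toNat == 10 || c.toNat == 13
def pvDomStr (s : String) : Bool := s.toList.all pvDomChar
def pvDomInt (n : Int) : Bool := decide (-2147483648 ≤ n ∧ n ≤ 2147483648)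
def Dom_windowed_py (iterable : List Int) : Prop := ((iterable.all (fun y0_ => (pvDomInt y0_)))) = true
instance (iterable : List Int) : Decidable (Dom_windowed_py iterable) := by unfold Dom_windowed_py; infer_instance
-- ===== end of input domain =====

-- B replaces A's tee/zip_longest lookahead pairing with one enumerate pass comparing indices (simpler decomposition, same cost).

-- ===== PORT A =====
-- A's loop over zip_longest(a, b) with b one step ahead: on a List Int the fill
-- value None appears exactly when b is exhausted, i.e. at the last element, so
-- the pair (x, y) becomes the pattern 'x :: y :: rest' (y present) vs '[x]' (y is None).
def windowLoopA : List Int → Bool → List (Int × Bool × Bool)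
  | [], _ => []
  | [x], isFirst => [(x, isFirst, true)]
  | x :: y :: rest, isFirst => (x, isFirst, false) :: windowLoopA (y :: rest) false

def windowed_py (iterable : List Int) : List (Int × Bool × Bool) :=
  windowLoopA iterable true

-- ===== PORT B =====
def windowed_py_alt (iterable : List Int) : List (Int × Bool × Bool) :=
  let seq := iterable
  let last : Int := (seq.length : Int) - 1
  (PySem.List.enumerate seq 0).map (fun p => (p.2, decide (p.1 = 0), decide (p.1 = last)))

-- ===== PRECONDITION & SPEC =====
def Spec_windowed_py (iterable : List Int) (out : List (Int × Bool × Bool)) : Prop := out = windowed_py_alt iterable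
instance (iterable : List Int) (out : List (Int × Bool × Bool)) : Decidable (Spec_windowed_py iterable out) := by unfold Spec_windowed_py; infer_instance

-- ===== CLAIM (what is proved, stated in full; the proofs are below) =====
def Claim_equal_windowed_py : Prop := ∀ (iterable : List Int), Dom_windowed_py iterable → Spec_windowed_py iterable (windowed_py iterable)

-- ===== LEMMAS AND PROOFS =====
theorem windowLoopA_eq_enumerate :
    ∀ (xs : List Int) (s L : Int), 0 ≤ s → L = s + xs.length - 1 →
      windowLoopA xs (decide (s = 0)) =
        (PySem.List.enumerate xs s).map (fun p => (p.2, decide (p.1 = 0), decide (p.1 = L)))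
  | [], s, L, _, _ => by simp [windowLoopA, PySem.List.enumerate_nil]
  | [x], s, L, hs, hL => by
    have : s = L := by simp at hL; omega
    simp [windowLoopA, PySem.List.enumerate_cons, PySem.List.enumerate_nil, this]
  | x :: y :: rest, s, L, hs, hL => by
    have hne : decide (s = L) = false := by
      simp only [List.length_cons] at hL
      simp only [decide_eq_false_iff_not]
      push_cast at hL
      omega
    have hF : (false : Bool) = decide (s + 1 = 0) := by
      have h1 : ¬ (s + 1 = 0) := by omega
      simp [h1]
    have hL' : L = (s + 1) + (y :: rest).length - 1 := by
      simp only [List.length_cons] at hL ⊢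
      push_cast at hL ⊢
      omega
    rw [windowLoopA, PySem.List.enumerate_cons, List.map_cons, hne, hF,
      windowLoopA_eq_enumerate (y :: rest) (s + 1) L (by omega) hL']

-- ===== VERDICT (by name: the statement is the Claim_ definition above) =====
theorem windowed_py_spec : Claim_equal_windowed_py := by
  intro xs _
  unfold Spec_windowed_py windowed_py windowed_py_alt
  have h := windowLoopA_eq_enumerate xs 0 ((xs.length : Int) - 1) le_rfl (by omega)
  simpa using h
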